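-- pv_equiv track=rewrite | github.com/Minerstove/Python | Prac6/6i.py | move2d
-- ===== SOURCE A (Python) =====
-- def move2d(loc, moves):
--     l_loc = list(loc)
--     for direc, step in moves:
--         if direc == "south":
--             l_loc[1] -= step
--         elif direc == "west":
--             l_loc[0] -= step
--         elif direc == "north":
--             l_loc[1] += step
--         else:
--             l_loc[0] += step
--
--     return tuple(l_loc)
-- ===== SOURCE B (Python) =====
-- _VEC = {"south": (0, -1), "west": (-1, 0), "north": (0, 1)}
--
--
-- def _disp(moves):
--     # net displacement of a non-empty chunk, by divide and conquer
--     if len(moves) == 1: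
--         d, step = moves[0]
--         ux, uy = _VEC.get(d, (1, 0))
--         return (step * ux, step * uy)
--     mid = len(moves) // 2
--     x1, y1 = _disp(moves[:mid])
--     x2, y2 = _disp(moves[mid:])
--     return (x1 + x2, y1 + y2)
--
--
-- def move2d(loc, moves):
--     if not moves:
--         return tuple(loc)
--     dx, dy = _disp(moves)
--     return (loc[0] + dx, loc[1] + dy)
-- ===== Notes on version B (the rewrite author's own statement) =====
-- stated objective: alternative
-- what changed: B replaces A's sequential per-move branch-and-mutate loop with a table-driven divide-and-conquer: each move is mapped to step*unit-vector via a direction dictionary and the net displacement is computed by recursively splitting the move list in half and adding the halves' vectors, applied to loc once at the end.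
import Mathlib
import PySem

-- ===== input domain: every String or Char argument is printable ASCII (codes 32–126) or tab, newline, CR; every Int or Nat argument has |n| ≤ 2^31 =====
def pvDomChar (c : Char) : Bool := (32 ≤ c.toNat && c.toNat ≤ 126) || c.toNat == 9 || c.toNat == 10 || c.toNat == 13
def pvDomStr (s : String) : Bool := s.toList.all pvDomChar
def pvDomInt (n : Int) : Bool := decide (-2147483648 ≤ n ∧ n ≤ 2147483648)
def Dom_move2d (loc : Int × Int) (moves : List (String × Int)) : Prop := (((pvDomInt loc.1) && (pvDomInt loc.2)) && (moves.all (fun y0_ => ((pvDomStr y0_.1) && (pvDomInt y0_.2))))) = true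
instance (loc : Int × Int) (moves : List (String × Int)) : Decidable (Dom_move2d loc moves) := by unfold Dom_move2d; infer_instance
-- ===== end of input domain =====

-- B computes the net displacement by divide-and-conquer over the move list using a direction→unit-vector table, applied to loc once (alternative decomposition, same cost).


-- ===== PORT A =====
-- for direc, step in moves: mutate l_loc per move
def move2d (loc : Int × Int) (moves : List (String × Int)) : Int × Int :=
  moves.foldl (fun l_loc m =>
    if m.1 = "south" then (l_loc.1, l_loc.2 - m.2)
    else if m.1 = "west" then (l_loc.1 - m.2, l_loc.2)
    else if m.1 = "north" then (l_loc.1, l_loc.2 + m.2)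
    else (l_loc.1 + m.2, l_loc.2)) loc

-- ===== PORT B =====
-- _VEC.get(d, (1, 0))
def pvVec (d : String) : Int × Int :=
  PySem.Dict.getD (PySem.Dict.ofList [("south", ((0 : Int), (-1 : Int))), ("west", ((-1 : Int), (0 : Int))), ("north", ((0 : Int), (1 : Int)))]) d ((1 : Int), (0 : Int))

-- _disp: net displacement of a non-empty chunk by divide and conquer
-- (the [] case is unreachable in Source B; it is a totality guard only)
def pvDisp : List (String × Int) → Int × Int
  | [] => (0, 0)
  | [m] =>
      let u := pvVec m.1
      (m.2 * u.1, m.2 * u.2)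
  | m :: m' :: rest =>
      let l := m :: m' :: rest
      let mid := l.length / 2
      let p1 := pvDisp (l.take mid)
      let p2 := pvDisp (l.drop mid)
      (p1.1 + p2.1, p1.2 + p2.2)
termination_by l => l.length
decreasing_by
  · simp; omega
  · simp; omega

def move2d_alt (loc : Int × Int) (moves : List (String × Int)) : Int × Int :=
  match moves with
  | [] => loc
  | _ =>
      let p := pvDisp moves
      (loc.1 + p.1, loc.2 + p.2)

-- ===== PRECONDITION & SPEC =====
def Spec_move2d (loc : Int × Int) (moves : List (String × Int)) (out : Int × Int) : Prop := out = move2d_alt loc moves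
instance (loc : Int × Int) (moves : List (String × Int)) (out : Int × Int) : Decidable (Spec_move2d loc moves out) := by unfold Spec_move2d; infer_instance

-- ===== CLAIM (what is proved, stated in full; the proofs are below) =====
def Claim_equal_move2d : Prop := ∀ (loc : Int × Int) (moves : List (String × Int)), Dom_move2d loc moves → Spec_move2d loc moves (move2d loc moves)

-- ===== LEMMAS AND PROOFS =====

-- the per-move vector, as sums over which pvDisp is characterised
def pvF (m : String × Int) : Int × Int := (m.2 * (pvVec m.1).1, m.2 * (pvVec m.1).2)

theorem pvVec_south : pvVec "south" = (0, -1) := by decide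
theorem pvVec_west : pvVec "west" = (-1, 0) := by decide
theorem pvVec_north : pvVec "north" = (0, 1) := by decide
theorem pvVec_other (d : String) (hs : d ≠ "south") (hw : d ≠ "west") (hn : d ≠ "north") :
    pvVec d = (1, 0) := by
  have hofl : PySem.Dict.ofList [("south", ((0 : Int), (-1 : Int))), ("west", ((-1 : Int), (0 : Int))), ("north", ((0 : Int), (1 : Int)))]
      = PySem.Dict.mk [("south", ((0 : Int), (-1 : Int))), ("west", ((-1 : Int), (0 : Int))), ("north", ((0 : Int), (1 : Int)))] := by decide
  simp [pvVec, hofl, PySem.Dict.getD_eq_get?_getD,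
    Ne.symm hs, Ne.symm hw, Ne.symm hn, PySem.Dict.get?]

theorem pvDisp_eq_sum (l : List (String × Int)) :
    pvDisp l = (((l.map pvF).map Prod.fst).sum, ((l.map pvF).map Prod.snd).sum) := by
  induction l using pvDisp.induct with
  | case1 => simp [pvDisp]
  | case2 m => rw [pvDisp]; simp [pvF]
  | case3 m m' rest ll mid ih1 ih2 =>
    rw [pvDisp, ih1, ih2]
    have h := List.take_append_drop ((m :: m' :: rest).length / 2) (m :: m' :: rest)
    conv_rhs => rw [← h]
    simp [show ll = m :: m' :: rest from rfl]

theorem move2d_eq_sum (loc : Int × Int) (moves : List (String × Int)) :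
    move2d loc moves = (loc.1 + ((moves.map pvF).map Prod.fst).sum,
                        loc.2 + ((moves.map pvF).map Prod.snd).sum) := by
  induction moves generalizing loc with
  | nil => simp [move2d]
  | cons m rest ih =>
    simp only [move2d, List.foldl_cons] at *
    by_cases hs : m.1 = "south"
    · simp [hs, ih, pvF, pvVec_south]; ring
    · by_cases hw : m.1 = "west"
      · simp [hw, ih, pvF, pvVec_west]; ring
      · by_cases hn : m.1 = "north"
        · simp [hn, ih, pvF, pvVec_north]; ring
        · simp [hs, hw, hn, ih, pvF, pvVec_other m.1 hs hw hn]; ring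

-- ===== VERDICT (by name: the statement is the Claim_ definition above) =====
theorem move2d_spec : Claim_equal_move2d := by
  intro loc moves _
  unfold Spec_move2d move2d_alt
  cases moves with
  | nil => simp [move2d]
  | cons m rest => simp only [move2d_eq_sum, pvDisp_eq_sum]
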